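-- pv_equiv track=rewrite | github.com/pypi-data/pypi-mirror-350 | packages/skyrc-gsm015/skyrc_gsm015-0.1.4-py3-none-any.whl/skyrc_gsm015/parse.py | split_flights
-- ===== SOURCE A (Python) =====
-- def split_flights(data):
--     """Returns a list of flights based on the parsed positions.
--     A flight starts with a DateTime record and ends with a Distance record,
--     although we just look for another DateTime or EOF."""
--     flights = []
--     flight = []
--     # Flights start with a DateTime record, accumulate until we get a DateTime record, or EOF
--     for r in data:
--         if r['Data Type'] == 'NOP':
--             continue
--         elif r['Data Type'] == 'DateTime':
--             if len(flight) > 0: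
--                 flights.append(flight)
--             flight = []
--         flight.append(r)
--     flights.append(flight)
--     return flights
-- ===== SOURCE B (Python) =====
-- def split_flights(data):
--     """Returns a list of flights based on the parsed positions.
--     Drops NOP records in a first pass, then repeatedly finds the next
--     DateTime boundary and slices off one whole flight per step."""
--     recs = [r for r in data if r['Data Type'] != 'NOP']
--     flights = []
--     while True:
--         j = next((i for i in range(1, len(recs))
--                   if recs[i]['Data Type'] == 'DateTime'), None)
--         if j is None:
--             flights.append(recs)
--             return flights
--         flights.append(recs[:j])
--         recs = recs[j:]
-- ===== Notes on version B (the rewrite author's own statement) =====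
-- stated objective: alternative
-- what changed: B first filters out the NOP records in a separate pass and then repeatedly finds the index of the next DateTime record and slices one whole flight off per loop iteration, instead of A's single record-by-record loop that accumulates an open flight and flushes it when a DateTime arrives.
import Mathlib
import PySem

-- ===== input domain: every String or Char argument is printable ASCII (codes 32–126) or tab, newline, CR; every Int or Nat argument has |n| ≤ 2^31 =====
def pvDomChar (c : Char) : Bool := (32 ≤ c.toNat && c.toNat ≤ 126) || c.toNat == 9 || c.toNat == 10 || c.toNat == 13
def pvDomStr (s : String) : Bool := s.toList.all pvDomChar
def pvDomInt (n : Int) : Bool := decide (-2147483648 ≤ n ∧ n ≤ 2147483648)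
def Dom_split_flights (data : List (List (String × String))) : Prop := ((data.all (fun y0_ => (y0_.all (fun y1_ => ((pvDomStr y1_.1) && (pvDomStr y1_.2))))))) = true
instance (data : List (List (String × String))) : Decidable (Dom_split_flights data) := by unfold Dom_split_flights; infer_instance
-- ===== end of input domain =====

-- B drops NOP records in a first pass and then repeatedly slices one whole flight off at the
-- next DateTime boundary, instead of A's record-by-record accumulator loop; objective: alternative.

-- ===== PORT A =====
-- r['Data Type'] is a first-match lookup; Pre_ guarantees the key is present (KeyError otherwise).
def split_flights (data : List (List (String × String))) : List (List (List (String × String))) :=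
  let st := data.foldl
    (fun (st : List (List (List (String × String))) × List (List (String × String))) r =>
      let t := (r.lookup "Data Type").getD ""
      if t == "NOP" then st
      else if t == "DateTime" then
        ((if st.2.length > 0 then st.1 ++ [st.2] else st.1), [r])
      else (st.1, st.2 ++ [r]))
    ([], [])
  st.1 ++ [st.2]

-- ===== PORT B =====
-- next((i for i in range(1, len(rs)) if rs[i]['Data Type'] == 'DateTime'), None):
-- the first index ≥ 1 holding a DateTime record (a scan of the tail, shifted by one; exact).
def pvNextDT (rs : List (List (String × String))) : Option Nat :=
  match rs with
  | [] => none
  | _ :: t => (t.findIdx? (fun r => (r.lookup "Data Type").getD "" == "DateTime")).map (· + 1)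

lemma pvNextDT_some {rs : List (List (String × String))} {j : Nat}
    (h : pvNextDT rs = some j) : 0 < j ∧ 0 < rs.length := by
  cases rs with
  | nil => simp [pvNextDT] at h
  | cons a t =>
    simp only [pvNextDT, Option.map_eq_some_iff] at h
    obtain ⟨k, -, rfl⟩ := h
    simp

-- the while loop of Source B: slice one flight per iteration
def pvSegs (rs : List (List (String × String))) : List (List (List (String × String))) :=
  match _h : pvNextDT rs with
  | none => [rs]
  | some j => rs.take j :: pvSegs (rs.drop j)
termination_by rs.length
decreasing_by
  have := pvNextDT_some _h
  simp only [List.length_drop]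
  omega

def split_flights_alt (data : List (List (String × String))) : List (List (List (String × String))) :=
  pvSegs (data.filter (fun r => !((r.lookup "Data Type").getD "" == "NOP")))

-- ===== PRECONDITION & SPEC =====
-- Pre_ excludes exactly the inputs where some record lacks the key 'Data Type': there both
-- Pythons raise KeyError.
def Pre_split_flights (data : List (List (String × String))) : Prop :=
  data.all (fun r => r.any (fun p => p.1 == "Data Type")) = true
instance (data : List (List (String × String))) : Decidable (Pre_split_flights data) := by
  unfold Pre_split_flights; infer_instance
def pvWitness_split_flights : (List (List (String × String))) :=
  [[("Data Type", "DateTime")], [("Data Type", "GPS"), ("Speed", "3")], [("Data Type", "NOP")],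
   [("Data Type", "DateTime")], [("Data Type", "Distance")]]
def Spec_split_flights (data : List (List (String × String))) (out : List (List (List (String × String)))) : Prop := out = split_flights_alt data
instance (data : List (List (String × String))) (out : List (List (List (String × String)))) : Decidable (Spec_split_flights data out) := by unfold Spec_split_flights; infer_instance

-- ===== CLAIM (what is proved, stated in full; the proofs are below) =====
def Claim_equal_split_flights : Prop := ∀ (data : List (List (String × String))), Dom_split_flights data → Pre_split_flights data → Spec_split_flights data (split_flights data)

-- ===== LEMMAS AND PROOFS =====

def pvIsDT (r : List (String × String)) : Bool := (r.lookup "Data Type").getD "" == "DateTime"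
def pvIsNOP (r : List (String × String)) : Bool := (r.lookup "Data Type").getD "" == "NOP"

-- canonical segmentation of a NOP-free list: a (possibly empty) leading segment,
-- then one segment per DateTime
def gseg0 : List (List (String × String)) → List (List (List (String × String)))
  | [] => [[]]
  | r :: rest =>
    let fs := gseg0 rest
    if pvIsDT r then [] :: (r :: fs.headD []) :: fs.drop 1
    else (r :: fs.headD []) :: fs.drop 1

-- the same segmentation skipping NOPs (intermediate form for A's fold)
def gseg : List (List (String × String)) → List (List (List (String × String)))
  | [] => [[]]
  | r :: rest =>
    let fs := gseg rest
    if pvIsNOP r then fs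
    else if pvIsDT r then [] :: (r :: fs.headD []) :: fs.drop 1
    else (r :: fs.headD []) :: fs.drop 1

-- how A's open segment `cur` combines with the canonical segmentation of the rest
def mergeSeg (cur : List (List (String × String))) :
    List (List (List (String × String))) → List (List (List (String × String)))
  | [] => []
  | s :: ss => if s = [] ∧ ss ≠ [] then (if cur = [] then ss else cur :: ss) else (cur ++ s) :: ss

lemma gseg_ne_nil (data : List (List (String × String))) : gseg data ≠ [] := by
  induction data with
  | nil => simp [gseg]
  | cons r rest ih =>
    simp only [gseg]
    rcases h : gseg rest with _ | ⟨s, ss⟩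
    · exact absurd h ih
    · split_ifs <;> simp

lemma mergeSeg_single (r : List (String × String)) (s : List (List (String × String)))
    (ss : List (List (List (String × String)))) : mergeSeg [r] (s :: ss) = (r :: s) :: ss := by
  by_cases hs : s = [] ∧ ss ≠ []
  · rcases hs with ⟨rfl, h⟩; simp [mergeSeg, h]
  · simp [mergeSeg, hs]

lemma foldA_eq (data : List (List (String × String)))
    (fls : List (List (List (String × String)))) (cur : List (List (String × String))) :
    (data.foldl
      (fun (st : List (List (List (String × String))) × List (List (String × String))) r =>
        let t := (r.lookup "Data Type").getD ""
        if t == "NOP" then st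
        else if t == "DateTime" then
          ((if st.2.length > 0 then st.1 ++ [st.2] else st.1), [r])
        else (st.1, st.2 ++ [r])) (fls, cur)).1
      ++ [(data.foldl
      (fun (st : List (List (List (String × String))) × List (List (String × String))) r =>
        let t := (r.lookup "Data Type").getD ""
        if t == "NOP" then st
        else if t == "DateTime" then
          ((if st.2.length > 0 then st.1 ++ [st.2] else st.1), [r])
        else (st.1, st.2 ++ [r])) (fls, cur)).2]
      = fls ++ mergeSeg cur (gseg data) := by
  induction data generalizing fls cur with
  | nil => simp [gseg, mergeSeg]
  | cons r rest ih =>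
    simp only [List.foldl_cons, gseg]
    rcases hg : gseg rest with _ | ⟨s, ss⟩
    · exact absurd hg (gseg_ne_nil rest)
    by_cases hnop : ((r.lookup "Data Type").getD "" == "NOP") = true
    · simp only [hnop, if_pos, ih, hg, pvIsNOP]
    by_cases hdt : ((r.lookup "Data Type").getD "" == "DateTime") = true
    · simp only [pvIsNOP, pvIsDT, hnop, hdt, if_neg, if_pos, Bool.not_eq_true] at *
      by_cases hc : cur = []
      · subst hc
        simp only [List.length_nil, gt_iff_lt, lt_irrefl, if_false, ih, hg, mergeSeg_single,
          List.headD_cons, List.drop_succ_cons, List.drop_zero]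
        simp [mergeSeg]
      · have hlen : cur.length > 0 := List.length_pos_iff.mpr hc
        simp only [hlen, if_pos, ih, hg, mergeSeg_single,
          List.headD_cons, List.drop_succ_cons, List.drop_zero]
        simp [mergeSeg, hc]
    · simp only [pvIsNOP, pvIsDT, hnop, hdt, if_neg, Bool.not_eq_true] at *
      simp only [ih, hg, List.headD_cons, List.drop_succ_cons, List.drop_zero]
      by_cases hs : s = [] ∧ ss ≠ []
      · rcases hs with ⟨rfl, h⟩; simp [mergeSeg, h]
      · simp [mergeSeg, hs]

-- dropping the NOP records first commutes with the segmentation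
lemma gseg_eq_filter (data : List (List (String × String))) :
    gseg data = gseg0 (data.filter (fun r => !pvIsNOP r)) := by
  induction data with
  | nil => simp [gseg, gseg0]
  | cons r rest ih =>
    by_cases h : pvIsNOP r = true
    · simp [gseg, h, ih]
    · simp only [Bool.not_eq_true] at h
      simp [gseg, gseg0, h, ih]

-- F rs = A's final value on a NOP-free list rs
def F (rs : List (List (String × String))) : List (List (List (String × String))) :=
  mergeSeg [] (gseg0 rs)

lemma F_cons (r : List (String × String)) (rest : List (List (String × String))) :
    F (r :: rest) = (r :: (gseg0 rest).headD []) :: (gseg0 rest).drop 1 := by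
  simp only [F, gseg0]
  by_cases h : pvIsDT r = true
  · simp [h, mergeSeg]
  · simp only [Bool.not_eq_true] at h
    simp [h, mergeSeg]

lemma gseg0_cases (rs : List (List (String × String))) :
    gseg0 rs = if (rs ≠ [] ∧ pvIsDT (rs.headD []) = true) then [] :: F rs else F rs := by
  cases rs with
  | nil => simp [gseg0, F, mergeSeg]
  | cons r rest =>
    rw [F_cons]
    by_cases h : pvIsDT r = true
    · simp [gseg0, h]
    · simp only [Bool.not_eq_true] at h
      simp [gseg0, h]

lemma gseg0_no_dt (rs : List (List (String × String)))
    (h : ∀ r ∈ rs, pvIsDT r = false) : gseg0 rs = [rs] := by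
  induction rs with
  | nil => simp [gseg0]
  | cons r rest ih =>
    have hr := h r (by simp)
    rw [gseg0, ih (fun x hx => h x (by simp [hx]))]
    simp [hr]

lemma pvSegs_none {rs : List (List (String × String))} (h : pvNextDT rs = none) :
    pvSegs rs = [rs] := by
  rw [pvSegs]; split <;> simp_all

lemma pvSegs_some {rs : List (List (String × String))} {j : Nat} (h : pvNextDT rs = some j) :
    pvSegs rs = rs.take j :: pvSegs (rs.drop j) := by
  rw [pvSegs]; split <;> simp_all

-- main B-side lemma: the slicing loop computes A's canonical value
lemma pvSegs_eq_F (rs : List (List (String × String))) : pvSegs rs = F rs := by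
  induction rs with
  | nil =>
    rw [pvSegs_none (by simp [pvNextDT])]
    simp [F, gseg0, mergeSeg]
  | cons r rest ih =>
    cases rest with
    | nil =>
      rw [pvSegs_none (by simp [pvNextDT])]
      rw [F_cons]; simp [gseg0]
    | cons r' rest' =>
      rw [F_cons]
      by_cases hdt : pvIsDT r' = true
      · have hnext : pvNextDT (r :: r' :: rest') = some 1 := by
          simp [pvNextDT, List.findIdx?_cons, pvIsDT] at hdt ⊢; simp [hdt]
        rw [pvSegs_some hnext]
        simp only [List.take_succ_cons, List.take_zero, List.drop_succ_cons, List.drop_zero, ih]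
        rw [gseg0_cases (r' :: rest')]
        simp [hdt]
      · have hdt' : pvIsDT r' = false := by simpa using hdt
        have hg : gseg0 (r' :: rest') = F (r' :: rest') := by
          rw [gseg0_cases (r' :: rest')]; simp [hdt']
        rcases hfind : (rest'.findIdx? (fun x => (x.lookup "Data Type").getD "" == "DateTime")) with _ | k
        · -- no DateTime anywhere after r
          have hnone : pvNextDT (r :: r' :: rest') = none := by
            simp [pvNextDT, List.findIdx?_cons, pvIsDT] at hdt' ⊢
            simp [hdt', hfind]
          rw [pvSegs_none hnone, hg, F_cons]
          have : gseg0 rest' = [rest'] := by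
            apply gseg0_no_dt
            intro x hx
            have := List.findIdx?_eq_none_iff.mp hfind x hx
            simpa [pvIsDT] using this
          simp [this]
        · -- next DateTime is at index k+2 of the whole list
          have hnextR : pvNextDT (r' :: rest') = some (k + 1) := by
            simp [pvNextDT, hfind]
          have hnext : pvNextDT (r :: r' :: rest') = some (k + 2) := by
            simp [pvNextDT, List.findIdx?_cons, pvIsDT] at hdt' ⊢
            simp [hdt', hfind]
          rw [pvSegs_some hnext]
          rw [pvSegs_some hnextR] at ih
          rw [hg, ← ih]
          simp [List.take_succ_cons, List.drop_succ_cons]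

theorem split_flights_spec : Claim_equal_split_flights := by
  intro data _ _
  show split_flights data = split_flights_alt data
  have hA := foldA_eq data [] []
  simp only [split_flights, split_flights_alt]
  rw [hA, List.nil_append, gseg_eq_filter, pvSegs_eq_F, F]
  rfl
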